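-- pv_equiv track=rewrite | github.com/jung9156/studies | lecture/algorithm/problem/line3.py | solution
-- ===== SOURCE A (Python) =====
-- def solution(road, n):
--     road += '0'
--     answer = -1
--     road_l = list(road)
--     A = []
--     for idx, i in enumerate(road_l):
--         if i == '0':
--             A.append(idx)
--     if len(A) <= n:
--         answer = len(road) - 1
--     else:
--         re = []
--         for i in range(n, len(A)):
--             if i == n:
--                 re.append(A[i])
--             else:
--                 re.append(A[i] - A[i-(n+1)] - 1)
--         answer = max(re)
--
--
--     return answer
-- ===== SOURCE B (Python) =====
-- def solution(road, n):
--     best = 0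
--     left = 0
--     count = 0
--     for right in range(len(road)):
--         if road[right] == '0':
--             count += 1
--         while count > n:
--             if road[left] == '0':
--                 count -= 1
--             left += 1
--         if right - left + 1 > best:
--             best = right - left + 1
--     return best
-- ===== Notes on version B (the rewrite author's own statement) =====
-- stated objective: idiomatic
-- what changed: Replaced A's three-pass pipeline (build the zero-position list of road+'0', build a gap list over (n+1)-apart zero indices, take its max) by a single-pass two-pointer sliding window over the string that keeps a left index and a running zero count and maximizes the window length with at most n zeros.
-- outside the precondition, e.g. on solution('11', -1): A returns 2, B raises IndexError
import Mathlib
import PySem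

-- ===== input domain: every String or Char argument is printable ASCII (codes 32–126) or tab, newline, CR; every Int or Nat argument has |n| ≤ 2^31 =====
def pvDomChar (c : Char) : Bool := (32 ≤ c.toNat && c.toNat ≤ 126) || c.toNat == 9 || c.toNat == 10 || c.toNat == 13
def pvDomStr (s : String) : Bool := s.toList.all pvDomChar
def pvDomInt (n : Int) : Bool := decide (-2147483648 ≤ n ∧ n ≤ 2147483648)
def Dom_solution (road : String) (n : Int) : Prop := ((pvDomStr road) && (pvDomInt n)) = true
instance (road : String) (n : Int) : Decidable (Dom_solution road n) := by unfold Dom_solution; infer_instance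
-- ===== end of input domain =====

-- B replaces A's three-pass pipeline over the zero-position list by a one-pass two-pointer
-- sliding window (longest window with at most n zeros); same O(len) cost, a single pass.

-- ===== PORT A =====
def solution (road : String) (n : Int) : Int :=
  -- road += '0'; road_l = list(road)  (ported as the char list of road with '0' appended)
  let roadL : List Char := road.toList ++ ['0']
  -- A = [] ; for idx, i in enumerate(road_l): if i == '0': A.append(idx)
  let A : List Int := (PySem.List.enumerate roadL).foldl
    (fun acc p => if p.2 = '0' then acc ++ [p.1] else acc) []
  if (A.length : Int) ≤ n then
    -- answer = len(road) - 1  (road already carries the appended '0')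
    (roadL.length : Int) - 1
  else
    -- re = [] ; for i in range(n, len(A)): …append…  (A[i] is in range whenever 0 ≤ n, see Pre_)
    let re : List Int := (PySem.List.pyRange n (A.length : Int) 1).foldl
      (fun acc i =>
        if i == n then acc ++ [PySem.List.pyGetD A i 0]
        else acc ++ [PySem.List.pyGetD A i 0 - PySem.List.pyGetD A (i - (n + 1)) 0 - 1]) []
    -- answer = max(re)  (re ≠ [] whenever 0 ≤ n; Python raises on empty re, excluded by Pre_)
    ((PySem.List.max? re (fun x => x)).getD (-1))

-- ===== PORT B =====
-- while count > n: (advance left)  — fuel bounds the iterations; with 0 ≤ n the loop exits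
-- before fuel runs out (fuel = len+1 exceeds the number of possible left positions)
def solutionAltShrink (cs : List Char) (n : Int) : Nat → Nat → Int → Nat × Int
  | 0, left, count => (left, count)
  | fuel + 1, left, count =>
    if n < count then
      solutionAltShrink cs n fuel (left + 1)
        (if cs.getD left ' ' = '0' then count - 1 else count)
    else (left, count)

-- one iteration of Source B's for-loop body; state = (left, count, best)
def solutionAltStep (cs : List Char) (n : Int) (st : Nat × Int × Int) (right : Nat) :
    Nat × Int × Int :=
  let count := if cs.getD right ' ' = '0' then st.2.1 + 1 else st.2.1
  let p := solutionAltShrink cs n (cs.length + 1) st.1 count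
  (p.1, p.2, if st.2.2 < (right : Int) - p.1 + 1 then (right : Int) - p.1 + 1 else st.2.2)

def solution_alt (road : String) (n : Int) : Int :=
  -- for right in range(len(road)): … road[right] … (index always in range)
  ((List.range road.toList.length).foldl (solutionAltStep road.toList n) (0, 0, 0)).2.2

-- ===== PRECONDITION & SPEC =====
-- Pre_ excludes negative n: there A raises IndexError (always for n ≤ -2; for n = -1 its
-- negative-index wraparound A[-1] yields the appended sentinel's position on nonempty road,
-- where B's sliding window itself raises IndexError).
def Pre_solution (road : String) (n : Int) : Prop := 0 ≤ n
instance (road : String) (n : Int) : Decidable (Pre_solution road n) := by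
  unfold Pre_solution; infer_instance
def pvWitness_solution : String × Int := ("0110", 1)

def Spec_solution (road : String) (n : Int) (out : Int) : Prop := out = solution_alt road n
instance (road : String) (n : Int) (out : Int) : Decidable (Spec_solution road n out) := by
  unfold Spec_solution; infer_instance

-- ===== CLAIM (what is proved, stated in full; the proofs are below) =====
def Claim_equal_solution : Prop := ∀ (road : String) (n : Int),
  Dom_solution road n → Pre_solution road n → Spec_solution road n (solution road n)

-- ===== LEMMAS AND PROOFS =====

-- number of '0' characters of cs at indices in [l, r)
def pvInd (cs : List Char) (i : Nat) : Nat := if cs.getD i ' ' = '0' then 1 else 0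
def pvZC (cs : List Char) (l r : Nat) : Nat := ∑ i ∈ Finset.Ico l r, pvInd cs i

-- least l with at most n zeros in [l, r)  (the disjunct l = r makes the witness unconditional)
def pvLmin (cs : List Char) (n : Int) (r : Nat) : Nat :=
  Nat.find (p := fun l => (pvZC cs l r : Int) ≤ n ∨ l = r) ⟨r, Or.inr rfl⟩

-- best window value over window ends 0..m
def pvF (cs : List Char) (n : Int) (m : Nat) : Int :=
  (List.range (m + 1)).foldl (fun acc (k : Nat) => max acc ((k : Int) - pvLmin cs n k)) 0

-- zero positions below r, in increasing order
def pvZl (cs : List Char) (r : Nat) : List Nat :=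
  (List.range r).filter (fun i => cs.getD i ' ' == '0')

theorem pvGetD_append {α : Type} (d : α) (l l' : List α) {k : Nat} (h : k < l.length) :
    (l ++ l').getD k d = l.getD k d := by
  rw [List.getD_eq_getElem?_getD, List.getD_eq_getElem?_getD, List.getElem?_append_left h]

theorem pvGetD_append_len {α : Type} (d : α) (l : List α) (a : α) :
    (l ++ [a]).getD l.length d = a := by
  rw [List.getD_eq_getElem?_getD, List.getElem?_append_right (le_refl _)]
  simp

theorem pvZC_self (cs : List Char) (r : Nat) : pvZC cs r r = 0 := by simp [pvZC]

theorem pvZC_split (cs : List Char) {l m r : Nat} (h1 : l ≤ m) (h2 : m ≤ r) :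
    pvZC cs l r = pvZC cs l m + pvZC cs m r := by
  unfold pvZC; rw [Finset.sum_Ico_consecutive _ h1 h2]

theorem pvZC_succ_right (cs : List Char) {l r : Nat} (h : l ≤ r) :
    pvZC cs l (r + 1) = pvZC cs l r + pvInd cs r := by
  unfold pvZC; rw [Finset.sum_Ico_succ_top h]

theorem pvZC_cons_left (cs : List Char) {l r : Nat} (h : l < r) :
    pvZC cs l r = pvInd cs l + pvZC cs (l + 1) r := by
  rw [pvZC_split cs (Nat.le_succ l) h]
  congr 1
  rw [pvZC_succ_right cs (le_refl l), pvZC_self]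
  omega

theorem pvZC_anti (cs : List Char) {l l' r : Nat} (h : l ≤ l') :
    pvZC cs l' r ≤ pvZC cs l r := by
  unfold pvZC
  exact Finset.sum_le_sum_of_subset (Finset.Ico_subset_Ico h (le_refl r))

theorem pvZC_mono (cs : List Char) {l r r' : Nat} (h : r ≤ r') :
    pvZC cs l r ≤ pvZC cs l r' := by
  unfold pvZC
  exact Finset.sum_le_sum_of_subset (Finset.Ico_subset_Ico (le_refl l) h)

theorem pvLmin_le (cs : List Char) (n : Int) (r : Nat) : pvLmin cs n r ≤ r :=
  Nat.find_le (Or.inr rfl)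

theorem pvLmin_spec (cs : List Char) {n : Int} (hn : 0 ≤ n) (r : Nat) :
    (pvZC cs (pvLmin cs n r) r : Int) ≤ n := by
  rcases Nat.find_spec (p := fun l => (pvZC cs l r : Int) ≤ n ∨ l = r) ⟨r, Or.inr rfl⟩ with h | h
  · exact h
  · rw [show pvLmin cs n r = r from h, pvZC_self]; simpa

theorem pvLmin_min (cs : List Char) (n : Int) (r : Nat) {l : Nat} (hl : l < pvLmin cs n r) :
    n < (pvZC cs l r : Int) := by
  have := Nat.find_min (p := fun l => (pvZC cs l r : Int) ≤ n ∨ l = r) ⟨r, Or.inr rfl⟩ hl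
  push_neg at this
  exact this.1

theorem pvLmin_eq (cs : List Char) {n : Int} (hn : 0 ≤ n) {r left : Nat} (hle : left ≤ r)
    (hsat : (pvZC cs left r : Int) ≤ n)
    (hmin : ∀ l, l < left → n < (pvZC cs l r : Int)) : pvLmin cs n r = left := by
  have h1 : pvLmin cs n r ≤ left := Nat.find_le (Or.inl hsat)
  rcases Nat.lt_or_ge (pvLmin cs n r) left with h | h
  · exact absurd (pvLmin_spec cs hn r) (by have := hmin _ h; omega)
  · omega

theorem pvLmin_of_small (cs : List Char) {n : Int} (hn : 0 ≤ n) {r : Nat}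
    (hr : (pvZC cs 0 r : Int) ≤ n) : pvLmin cs n r = 0 :=
  pvLmin_eq cs hn (Nat.zero_le r) hr (fun l hl => absurd hl (Nat.not_lt_zero l))

theorem pvF_zero (cs : List Char) (n : Int) : pvF cs n 0 = 0 := by
  have h0 : pvLmin cs n 0 = 0 := Nat.le_zero.mp (pvLmin_le cs n 0)
  simp [pvF, h0]

theorem pvF_succ (cs : List Char) (n : Int) (m : Nat) :
    pvF cs n (m + 1) = max (pvF cs n m) (((m + 1 : Nat) : Int) - pvLmin cs n (m + 1)) := by
  unfold pvF
  rw [List.range_succ, List.foldl_append]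
  simp

theorem pvF_ge (cs : List Char) (n : Int) {m k : Nat} (hk : k ≤ m) :
    (k : Int) - pvLmin cs n k ≤ pvF cs n m := by
  unfold pvF
  exact (PySem.List.le_foldl_max_int _ _ _).2 k (List.mem_range.mpr (by omega))

theorem pvF_cases (cs : List Char) (n : Int) (m : Nat) :
    pvF cs n m = 0 ∨ ∃ k, k ≤ m ∧ pvF cs n m = (k : Int) - pvLmin cs n k := by
  induction m with
  | zero => exact Or.inl (pvF_zero cs n)
  | succ m ih =>
    rw [pvF_succ]
    rcases max_cases (pvF cs n m) (((m + 1 : Nat) : Int) - pvLmin cs n (m + 1)) with ⟨h, _⟩ | ⟨h, _⟩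
    · rw [h]
      rcases ih with h0 | ⟨k, hk, he⟩
      · exact Or.inl h0
      · exact Or.inr ⟨k, by omega, he⟩
    · rw [h]
      exact Or.inr ⟨m + 1, le_refl _, rfl⟩

-- ===== B-side: the two-pointer fold computes pvF =====

theorem shrink_eq (cs : List Char) {n : Int} (hn : 0 ≤ n) (r : Nat) :
    ∀ (fuel left : Nat) (count : Int), left ≤ r → count = (pvZC cs left r : Int) →
      (∀ l, l < left → n < (pvZC cs l r : Int)) → r ≤ left + fuel →
      solutionAltShrink cs n fuel left count =
        (pvLmin cs n r, (pvZC cs (pvLmin cs n r) r : Int)) := by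
  intro fuel
  induction fuel with
  | zero =>
    intro left count hle hc hmin hfuel
    have hlr : left = r := by omega
    subst hlr
    have hL : pvLmin cs n left = left :=
      pvLmin_eq cs hn (le_refl left) (by rw [pvZC_self]; simpa) hmin
    simp [solutionAltShrink, hL, hc]
  | succ fuel ih =>
    intro left count hle hc hmin hfuel
    simp only [solutionAltShrink]
    by_cases hcnt : n < count
    · rw [if_pos hcnt]
      have hlr : left < r := by
        rcases Nat.lt_or_ge left r with h | h
        · exact h
        · exfalso
          have hlr' : left = r := by omega
          rw [hc, hlr', pvZC_self] at hcnt
          simp at hcnt; omega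
      have hsplit : pvZC cs left r = pvInd cs left + pvZC cs (left + 1) r :=
        pvZC_cons_left cs hlr
      have hstep : (if cs.getD left ' ' = '0' then count - 1 else count) =
          (pvZC cs (left + 1) r : Int) := by
        by_cases hch : cs.getD left ' ' = '0'
        · rw [if_pos hch, hc]
          have hi : pvInd cs left = 1 := by unfold pvInd; rw [if_pos hch]
          rw [hsplit, hi]; push_cast; ring
        · rw [if_neg hch, hc]
          have hi : pvInd cs left = 0 := by unfold pvInd; rw [if_neg hch]
          rw [hsplit, hi]; push_cast; ring_nf
      have hmin' : ∀ l, l < left + 1 → n < (pvZC cs l r : Int) := by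
        intro l hl
        rcases Nat.lt_or_ge l left with h | h
        · exact hmin l h
        · have hll : l = left := by omega
          rw [hll, ← hc]; exact hcnt
      exact ih (left + 1) _ (by omega) hstep hmin' (by omega)
    · rw [if_neg hcnt]
      have hL : pvLmin cs n r = left := pvLmin_eq cs hn hle (by rw [← hc]; omega) hmin
      rw [hL, hc]

theorem B_inv (cs : List Char) {n : Int} (hn : 0 ≤ n) :
    ∀ m, m ≤ cs.length →
      (List.range m).foldl (solutionAltStep cs n) (0, 0, 0) =
        (pvLmin cs n m, (pvZC cs (pvLmin cs n m) m : Int), pvF cs n m) := by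
  intro m
  induction m with
  | zero =>
    intro _
    have h0 : pvLmin cs n 0 = 0 := Nat.le_zero.mp (pvLmin_le cs n 0)
    simp [h0, pvZC_self, pvF_zero]
  | succ m ih =>
    intro hm
    rw [List.range_succ, List.foldl_append, ih (by omega)]
    simp only [List.foldl_cons, List.foldl_nil]
    have hLle : pvLmin cs n m ≤ m := pvLmin_le cs n m
    have hcount : (if cs.getD m ' ' = '0' then (pvZC cs (pvLmin cs n m) m : Int) + 1
        else (pvZC cs (pvLmin cs n m) m : Int)) = (pvZC cs (pvLmin cs n m) (m + 1) : Int) := by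
      rw [pvZC_succ_right cs hLle]
      by_cases hch : cs.getD m ' ' = '0'
      · have hi : pvInd cs m = 1 := by unfold pvInd; rw [if_pos hch]
        rw [if_pos hch, hi]; push_cast; ring
      · have hi : pvInd cs m = 0 := by unfold pvInd; rw [if_neg hch]
        rw [if_neg hch, hi]; push_cast; ring
    have hmin' : ∀ l, l < pvLmin cs n m → n < (pvZC cs l (m + 1) : Int) := by
      intro l hl
      have h1 := pvLmin_min cs n m hl
      have h2 : pvZC cs l m ≤ pvZC cs l (m + 1) := pvZC_mono cs (by omega)
      omega
    have hsh := shrink_eq cs hn (m + 1) (cs.length + 1) (pvLmin cs n m)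
      (pvZC cs (pvLmin cs n m) (m + 1) : Int) (by omega) rfl hmin' (by omega)
    have hbest : (if pvF cs n m < (m : Int) - (pvLmin cs n (m + 1) : Int) + 1
        then (m : Int) - (pvLmin cs n (m + 1) : Int) + 1 else pvF cs n m) = pvF cs n (m + 1) := by
      rw [pvF_succ]
      have he : ((m + 1 : Nat) : Int) - pvLmin cs n (m + 1) =
          (m : Int) - (pvLmin cs n (m + 1) : Int) + 1 := by push_cast; ring
      rw [he]
      rcases lt_or_ge (pvF cs n m) ((m : Int) - (pvLmin cs n (m + 1) : Int) + 1) with h | h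
      · rw [if_pos h, max_eq_right (by omega)]
      · rw [if_neg (by omega), max_eq_left (by omega)]
    unfold solutionAltStep
    simp only [hcount, hsh, hbest]

theorem alt_eq_pvF (road : String) {n : Int} (hn : 0 ≤ n) :
    solution_alt road n = pvF road.toList n road.toList.length := by
  unfold solution_alt
  rw [B_inv road.toList hn road.toList.length (le_refl _)]

-- ===== A-side: the gap formula computes pvF =====

theorem pvZl_succ (cs : List Char) (r : Nat) :
    pvZl cs (r + 1) = pvZl cs r ++ (if cs.getD r ' ' = '0' then [r] else []) := by
  unfold pvZl
  rw [List.range_succ, List.filter_append]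
  congr 1
  by_cases h : cs.getD r ' ' = '0'
  · rw [if_pos h]
    rw [List.getD_eq_getElem?_getD] at h
    simp [List.filter_singleton, h]
  · rw [if_neg h]
    rw [List.getD_eq_getElem?_getD] at h
    simp [List.filter_singleton, h]

theorem pvZl_length (cs : List Char) (r : Nat) : (pvZl cs r).length = pvZC cs 0 r := by
  induction r with
  | zero => simp [pvZl, pvZC]
  | succ r ih =>
    rw [pvZl_succ, List.length_append, ih, pvZC_succ_right cs (Nat.zero_le r)]
    by_cases h : cs.getD r ' ' = '0'
    · rw [if_pos h]; unfold pvInd; rw [if_pos h]; rfl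
    · rw [if_neg h]; unfold pvInd; rw [if_neg h]; rfl

theorem pvZl_get (cs : List Char) (r : Nat) :
    ∀ k, k < (pvZl cs r).length →
      pvZC cs 0 ((pvZl cs r).getD k 0) = k ∧ cs.getD ((pvZl cs r).getD k 0) ' ' = '0' ∧
        (pvZl cs r).getD k 0 < r := by
  induction r with
  | zero => intro k hk; simp [pvZl] at hk
  | succ r ih =>
    intro k hk
    by_cases hch : cs.getD r ' ' = '0'
    · have hsplit : pvZl cs (r + 1) = pvZl cs r ++ [r] := by
        rw [pvZl_succ, if_pos hch]
      rcases Nat.lt_or_ge k (pvZl cs r).length with h | h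
      · have hget : (pvZl cs (r + 1)).getD k 0 = (pvZl cs r).getD k 0 := by
          rw [hsplit]; exact pvGetD_append 0 _ _ h
        rcases ih k h with ⟨h1, h2, h3⟩
        exact ⟨by rw [hget]; exact h1, by rw [hget]; exact h2, by rw [hget]; omega⟩
      · have hlen : (pvZl cs (r + 1)).length = (pvZl cs r).length + 1 := by
          rw [hsplit]; simp
        have hkeq : k = (pvZl cs r).length := by omega
        have hget : (pvZl cs (r + 1)).getD k 0 = r := by
          rw [hsplit, hkeq]; exact pvGetD_append_len 0 _ r
        refine ⟨?_, by rw [hget]; exact hch, by rw [hget]; omega⟩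
        rw [hget, hkeq, pvZl_length]
    · have hsplit : pvZl cs (r + 1) = pvZl cs r := by
        rw [pvZl_succ, if_neg hch, List.append_nil]
      rw [hsplit] at hk ⊢
      rcases ih k hk with ⟨h1, h2, h3⟩
      exact ⟨h1, h2, by omega⟩

theorem pvZl_count_succ (cs : List Char) (r : Nat) {k : Nat} (hk : k < (pvZl cs r).length) :
    pvZC cs 0 ((pvZl cs r).getD k 0 + 1) = k + 1 := by
  rcases pvZl_get cs r k hk with ⟨h1, h2, _⟩
  rw [pvZC_succ_right cs (Nat.zero_le _), h1]
  unfold pvInd; rw [if_pos h2]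

theorem pvZl_le_of_count (cs : List Char) (r : Nat) {k q : Nat} (hk : k < (pvZl cs r).length)
    (hq : pvZC cs 0 q ≤ k) : q ≤ (pvZl cs r).getD k 0 := by
  by_contra h
  push_neg at h
  have h1 : pvZC cs 0 ((pvZl cs r).getD k 0 + 1) ≤ pvZC cs 0 q := pvZC_mono cs (by omega)
  rw [pvZl_count_succ cs r hk] at h1
  omega

theorem pvZl_lt_of_count (cs : List Char) (r : Nat) {k q : Nat} (hk : k < (pvZl cs r).length)
    (hq : k < pvZC cs 0 q) : (pvZl cs r).getD k 0 < q := by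
  by_contra h
  push_neg at h
  have h1 : pvZC cs 0 q ≤ pvZC cs 0 ((pvZl cs r).getD k 0) := pvZC_mono cs h
  rw [(pvZl_get cs r k hk).1] at h1
  omega

-- bridging cs and cs ++ ['0']
theorem pvZC_append (cs : List Char) {l r : Nat} (hr : r ≤ cs.length) :
    pvZC (cs ++ ['0']) l r = pvZC cs l r := by
  unfold pvZC
  apply Finset.sum_congr rfl
  intro i hi
  have hlt : i < cs.length := by
    have := Finset.mem_Ico.mp hi; omega
  unfold pvInd
  rw [pvGetD_append ' ' cs ['0'] hlt]

theorem pvZC_ext_total (cs : List Char) :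
    pvZC (cs ++ ['0']) 0 (cs.length + 1) = pvZC cs 0 cs.length + 1 := by
  rw [pvZC_succ_right (cs ++ ['0']) (Nat.zero_le _), pvZC_append cs (le_refl _)]
  unfold pvInd
  rw [pvGetD_append_len ' ' cs '0', if_pos rfl]

theorem pvZlExt_length (cs : List Char) :
    (pvZl (cs ++ ['0']) (cs.length + 1)).length = pvZC cs 0 cs.length + 1 := by
  rw [pvZl_length, pvZC_ext_total]

-- the minimal left end of a window [l, r): one past the (j-n-1)-th zero of cs ++ ['0'],
-- where j = number of zeros below r, when that count exceeds n
theorem pvLmin_of_big (cs : List Char) {n : Int} (hn : 0 ≤ n) {r : Nat} (hr : r ≤ cs.length)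
    (hbig : n < (pvZC cs 0 r : Int)) :
    pvLmin cs n r =
      (pvZl (cs ++ ['0']) (cs.length + 1)).getD (pvZC cs 0 r - n.toNat - 1) 0 + 1 := by
  have hqn : (n.toNat : Int) = n := Int.toNat_of_nonneg hn
  have hjq : n.toNat < pvZC cs 0 r := by omega
  have hjz : pvZC cs 0 r ≤ pvZC cs 0 cs.length := pvZC_mono cs hr
  have ht : pvZC cs 0 r - n.toNat - 1 < (pvZl (cs ++ ['0']) (cs.length + 1)).length := by
    rw [pvZlExt_length]; omega
  rcases pvZl_get (cs ++ ['0']) (cs.length + 1) _ ht with ⟨hc1, hc2, hc3⟩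
  have hztr : (pvZl (cs ++ ['0']) (cs.length + 1)).getD (pvZC cs 0 r - n.toNat - 1) 0 < r := by
    apply pvZl_lt_of_count (cs ++ ['0']) (cs.length + 1) ht
    rw [pvZC_append cs hr]
    omega
  have hztlen : (pvZl (cs ++ ['0']) (cs.length + 1)).getD (pvZC cs 0 r - n.toNat - 1) 0 <
      cs.length := by omega
  have hcount : pvZC cs ((pvZl (cs ++ ['0']) (cs.length + 1)).getD (pvZC cs 0 r - n.toNat - 1) 0 + 1) r
      = n.toNat := by
    have hsplit : pvZC (cs ++ ['0']) 0 r =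
        pvZC (cs ++ ['0']) 0 ((pvZl (cs ++ ['0']) (cs.length + 1)).getD (pvZC cs 0 r - n.toNat - 1) 0 + 1) +
        pvZC (cs ++ ['0']) ((pvZl (cs ++ ['0']) (cs.length + 1)).getD (pvZC cs 0 r - n.toNat - 1) 0 + 1) r :=
      pvZC_split (cs ++ ['0']) (by omega) (by omega)
    have h1 := pvZl_count_succ (cs ++ ['0']) (cs.length + 1) ht
    have h2 : pvZC (cs ++ ['0']) 0 r = pvZC cs 0 r := pvZC_append cs hr
    have h3 : pvZC (cs ++ ['0']) ((pvZl (cs ++ ['0']) (cs.length + 1)).getD (pvZC cs 0 r - n.toNat - 1) 0 + 1) r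
        = pvZC cs ((pvZl (cs ++ ['0']) (cs.length + 1)).getD (pvZC cs 0 r - n.toNat - 1) 0 + 1) r :=
      pvZC_append cs hr
    omega
  apply pvLmin_eq cs hn (by omega) (by rw [hcount]; omega)
  intro l hl
  have h1 : pvZC cs ((pvZl (cs ++ ['0']) (cs.length + 1)).getD (pvZC cs 0 r - n.toNat - 1) 0) r ≤
      pvZC cs l r := pvZC_anti cs (by omega)
  have h2 : pvZC cs ((pvZl (cs ++ ['0']) (cs.length + 1)).getD (pvZC cs 0 r - n.toNat - 1) 0) r =
      pvInd cs ((pvZl (cs ++ ['0']) (cs.length + 1)).getD (pvZC cs 0 r - n.toNat - 1) 0) +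
      pvZC cs ((pvZl (cs ++ ['0']) (cs.length + 1)).getD (pvZC cs 0 r - n.toNat - 1) 0 + 1) r :=
    pvZC_cons_left cs hztr
  have h3 : pvInd cs ((pvZl (cs ++ ['0']) (cs.length + 1)).getD (pvZC cs 0 r - n.toNat - 1) 0) = 1 := by
    have hch : cs.getD ((pvZl (cs ++ ['0']) (cs.length + 1)).getD (pvZC cs 0 r - n.toNat - 1) 0) ' ' = '0' := by
      rw [← pvGetD_append ' ' cs ['0'] hztlen]
      exact hc2
    unfold pvInd; rw [if_pos hch]
  omega

-- A's zero-index list is the mapped filtered range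
theorem A_list_eq (cs' : List Char) :
    (PySem.List.enumerate cs').foldl (fun acc p => if p.2 = '0' then acc ++ [p.1] else acc) [] =
      List.map (fun i : Nat => (i : Int)) (pvZl cs' cs'.length) := by
  rw [PySem.List.enumerate_eq_map_pyRange cs' ' ', List.foldl_map]
  have hfun : (fun (acc : List Int) (j : Int) =>
      if (PySem.List.pyGetD cs' j ' ') = '0' then acc ++ [j] else acc) =
      (fun acc j => if (fun i => PySem.List.pyGetD cs' i ' ' == '0') j = true
        then acc ++ [id j] else acc) := by
    funext acc j
    simp [beq_iff_eq]
  have hlen : PySem.List.len cs' = (cs'.length : Int) := by simp [PySem.List.len_eq]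
  rw [hlen, hfun, PySem.List.foldl_append_if _ id _ []]
  rw [PySem.List.pyRange_zero_nat, List.filter_map, List.map_map]
  have hpq : ∀ i ∈ List.range cs'.length,
      ((fun j : Int => PySem.List.pyGetD cs' j ' ' == '0') ∘ (fun k : Nat => (k : Int))) i =
        (fun i => cs'.getD i ' ' == '0') i := by
    intro i _
    simp [PySem.List.pyGetD_natCast]
  rw [List.filter_congr hpq]
  unfold pvZl
  simp only [List.nil_append]
  rfl

-- the gap value at zero index k equals the window value at window end zs.getD k 0
theorem G_val (cs : List Char) {n : Int} (hn : 0 ≤ n) {k : Nat}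
    (hk1 : n.toNat ≤ k) (hk2 : k < (pvZl (cs ++ ['0']) (cs.length + 1)).length) :
    (((pvZl (cs ++ ['0']) (cs.length + 1)).getD k 0 : Nat) : Int) -
        pvLmin cs n ((pvZl (cs ++ ['0']) (cs.length + 1)).getD k 0) =
      (if k = n.toNat then (((pvZl (cs ++ ['0']) (cs.length + 1)).getD k 0 : Nat) : Int)
       else (((pvZl (cs ++ ['0']) (cs.length + 1)).getD k 0 : Nat) : Int) -
         (((pvZl (cs ++ ['0']) (cs.length + 1)).getD (k - n.toNat - 1) 0 : Nat) : Int) - 1) ∧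
      ((pvZl (cs ++ ['0']) (cs.length + 1)).getD k 0 : Nat) ≤ cs.length := by
  have hqn : (n.toNat : Int) = n := Int.toNat_of_nonneg hn
  rcases pvZl_get (cs ++ ['0']) (cs.length + 1) k hk2 with ⟨hc1, hc2, hc3⟩
  have hrlen : (pvZl (cs ++ ['0']) (cs.length + 1)).getD k 0 ≤ cs.length := by omega
  have hcr : pvZC cs 0 ((pvZl (cs ++ ['0']) (cs.length + 1)).getD k 0) = k := by
    rw [← pvZC_append cs hrlen]; exact hc1
  refine ⟨?_, hrlen⟩
  by_cases hkq : k = n.toNat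
  · rw [if_pos hkq]
    have hL : pvLmin cs n ((pvZl (cs ++ ['0']) (cs.length + 1)).getD k 0) = 0 :=
      pvLmin_of_small cs hn (by rw [hcr, hkq]; omega)
    rw [hL]; ring
  · rw [if_neg hkq]
    have hbig : n < (pvZC cs 0 ((pvZl (cs ++ ['0']) (cs.length + 1)).getD k 0) : Int) := by
      rw [hcr]; omega
    rw [pvLmin_of_big cs hn hrlen hbig, hcr]
    push_cast; ring

theorem foldl_max_le {a B : Int} {t : List Int} (ha : a ≤ B) (ht : ∀ y ∈ t, y ≤ B) :
    t.foldl max a ≤ B := by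
  rcases PySem.List.foldl_max_mem t a with h | h
  · rw [h]; exact ha
  · exact ht _ h

-- a two-branch appending fold is a map
theorem foldl_two_append (n : Int) (u v : Int → Int) (l : List Int) (acc : List Int) :
    l.foldl (fun acc i => if i == n then acc ++ [u i] else acc ++ [v i]) acc =
      acc ++ l.map (fun i => if i == n then u i else v i) := by
  induction l generalizing acc with
  | nil => simp
  | cons x t ih =>
    simp only [List.foldl_cons, List.map_cons]
    by_cases h : (x == n) = true
    · simp only [if_pos h]
      rw [ih, List.append_assoc]
      rfl
    · simp only [if_neg h]
      rw [ih, List.append_assoc]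
      rfl

-- A's list entry at index i equals the window value at the i-th zero
theorem A_entry_eq (cs : List Char) {n : Int} (hn : 0 ≤ n) (i : Int)
    (h1 : n ≤ i) (h2 : i ≤ (pvZC cs 0 cs.length : Int)) :
    (if i == n then
        PySem.List.pyGetD (List.map (fun j : Nat => (j : Int)) (pvZl (cs ++ ['0']) (cs.length + 1))) i 0
      else
        PySem.List.pyGetD (List.map (fun j : Nat => (j : Int)) (pvZl (cs ++ ['0']) (cs.length + 1))) i 0 -
        PySem.List.pyGetD (List.map (fun j : Nat => (j : Int)) (pvZl (cs ++ ['0']) (cs.length + 1))) (i - (n + 1)) 0 - 1) =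
      (((pvZl (cs ++ ['0']) (cs.length + 1)).getD i.toNat 0 : Nat) : Int) -
        pvLmin cs n ((pvZl (cs ++ ['0']) (cs.length + 1)).getD i.toNat 0) := by
  have hqn : (n.toNat : Int) = n := Int.toNat_of_nonneg hn
  have hzl := pvZlExt_length cs
  have h0i : 0 ≤ i := le_trans hn h1
  have hik : ((i.toNat : Nat) : Int) = i := Int.toNat_of_nonneg h0i
  have hkz : i.toNat ≤ pvZC cs 0 cs.length := by omega
  have hklen : i.toNat < (pvZl (cs ++ ['0']) (cs.length + 1)).length := by rw [hzl]; omega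
  have hk1 : n.toNat ≤ i.toNat := by omega
  have hAi : PySem.List.pyGetD (List.map (fun j : Nat => (j : Int)) (pvZl (cs ++ ['0']) (cs.length + 1))) i 0 =
      (((pvZl (cs ++ ['0']) (cs.length + 1)).getD i.toNat 0 : Nat) : Int) := by
    rw [PySem.List.pyGetD_eq_getElem _ 0 h0i (by rw [List.length_map, hzl]; push_cast; omega)]
    rw [List.getElem_map, List.getD_eq_getElem _ 0 hklen]
  rcases G_val cs hn hk1 hklen with ⟨hGv, _⟩
  rw [hGv]
  by_cases hin : (i == n) = true
  · have hie : i = n := by simpa using hin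
    rw [if_pos hin, if_pos (show i.toNat = n.toNat by rw [hie]), hAi]
  · have hie : ¬ i = n := by simpa using hin
    have hxq : ¬ i.toNat = n.toNat := by omega
    rw [if_neg hin, if_neg hxq, hAi]
    have hAj : PySem.List.pyGetD (List.map (fun j : Nat => (j : Int)) (pvZl (cs ++ ['0']) (cs.length + 1))) (i - (n + 1)) 0 =
        (((pvZl (cs ++ ['0']) (cs.length + 1)).getD (i.toNat - n.toNat - 1) 0 : Nat) : Int) := by
      have hj0 : 0 ≤ i - (n + 1) := by omega
      have hjlt : i - (n + 1) < ((List.map (fun j : Nat => (j : Int)) (pvZl (cs ++ ['0']) (cs.length + 1))).length : Int) := by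
        rw [List.length_map, hzl]; push_cast; omega
      rw [PySem.List.pyGetD_eq_getElem _ 0 hj0 hjlt, List.getElem_map]
      have htn : (i - (n + 1)).toNat = i.toNat - n.toNat - 1 := by omega
      have hjlen2 : i.toNat - n.toNat - 1 < (pvZl (cs ++ ['0']) (cs.length + 1)).length := by omega
      simp only [htn]
      rw [List.getD_eq_getElem _ 0 hjlen2]
    rw [hAj]

-- the maximum of A's gap values equals pvF once the zero count reaches n
theorem gap_max_eq (cs : List Char) {n : Int} (hn : 0 ≤ n) (g : Int → Int)
    (hg : ∀ i : Int, n ≤ i → i ≤ (pvZC cs 0 cs.length : Int) →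
      g i = (((pvZl (cs ++ ['0']) (cs.length + 1)).getD i.toNat 0 : Nat) : Int) -
        pvLmin cs n ((pvZl (cs ++ ['0']) (cs.length + 1)).getD i.toNat 0))
    (hq : n.toNat ≤ pvZC cs 0 cs.length) :
    List.foldl max (g n)
        ((PySem.List.pyRange (n + 1) ((pvZC cs 0 cs.length + 1 : Nat) : Int) 1).map g) =
      pvF cs n cs.length := by
  have hqn : (n.toNat : Int) = n := Int.toNat_of_nonneg hn
  have hzl := pvZlExt_length cs
  have hend : ∀ i : Int, n ≤ i → i ≤ (pvZC cs 0 cs.length : Int) →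
      (pvZl (cs ++ ['0']) (cs.length + 1)).getD i.toNat 0 ≤ cs.length ∧
      i.toNat < (pvZl (cs ++ ['0']) (cs.length + 1)).length := by
    intro i h1 h2
    have hklen : i.toNat < (pvZl (cs ++ ['0']) (cs.length + 1)).length := by
      rw [hzl]; omega
    have := (pvZl_get (cs ++ ['0']) (cs.length + 1) i.toNat hklen).2.2
    exact ⟨by omega, hklen⟩
  apply le_antisymm
  · apply foldl_max_le
    · rw [hg n (le_refl n) (by omega)]
      exact pvF_ge cs n (hend n (le_refl n) (by omega)).1
    · intro y hy
      rcases List.mem_map.mp hy with ⟨i, hi, rfl⟩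
      rcases PySem.List.mem_pyRange_one.mp hi with ⟨hi1, hi2⟩
      have hi2' : i ≤ (pvZC cs 0 cs.length : Int) := by push_cast at hi2; omega
      rw [hg i (by omega) hi2']
      exact pvF_ge cs n (hend i (by omega) hi2').1
  · rcases pvF_cases cs n cs.length with h0 | ⟨k0, hk0, he⟩
    · rw [h0]
      have h1 : 0 ≤ g n := by
        rw [hg n (le_refl n) (by omega)]
        have := pvLmin_le cs n ((pvZl (cs ++ ['0']) (cs.length + 1)).getD n.toNat 0)
        omega
      exact le_trans h1 (PySem.List.le_foldl_max _ _).1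
    · rw [he]
      by_cases hsm : (pvZC cs 0 k0 : Int) ≤ n
      · -- the window at k0 reaches back to 0; compare with the window at the n-th zero
        have hL : pvLmin cs n k0 = 0 := pvLmin_of_small cs hn hsm
        have hqlen : n.toNat < (pvZl (cs ++ ['0']) (cs.length + 1)).length := by
          rw [hzl]; omega
        have hle : k0 ≤ (pvZl (cs ++ ['0']) (cs.length + 1)).getD n.toNat 0 := by
          apply pvZl_le_of_count (cs ++ ['0']) (cs.length + 1) hqlen
          rw [pvZC_append cs hk0]; omega
        have hr : pvZC cs 0 ((pvZl (cs ++ ['0']) (cs.length + 1)).getD n.toNat 0) = n.toNat := by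
          rw [← pvZC_append cs (hend n (le_refl n) (by omega)).1]
          exact (pvZl_get (cs ++ ['0']) (cs.length + 1) n.toNat hqlen).1
        have hL2 : pvLmin cs n ((pvZl (cs ++ ['0']) (cs.length + 1)).getD n.toNat 0) = 0 :=
          pvLmin_of_small cs hn (by rw [hr]; omega)
        have hgn : g n = (((pvZl (cs ++ ['0']) (cs.length + 1)).getD n.toNat 0 : Nat) : Int) := by
          rw [hg n (le_refl n) (by omega), hL2]
          push_cast; ring
        have hstep : (k0 : Int) - pvLmin cs n k0 ≤ g n := by
          rw [hL, hgn]; push_cast; omega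
        exact le_trans hstep (PySem.List.le_foldl_max _ _).1
      · push_neg at hsm
        have hjq : n.toNat < pvZC cs 0 k0 := by omega
        have hjz : pvZC cs 0 k0 ≤ pvZC cs 0 cs.length := pvZC_mono cs hk0
        have hjlen : pvZC cs 0 k0 < (pvZl (cs ++ ['0']) (cs.length + 1)).length := by
          rw [hzl]; omega
        have hLb : pvLmin cs n k0 =
            (pvZl (cs ++ ['0']) (cs.length + 1)).getD (pvZC cs 0 k0 - n.toNat - 1) 0 + 1 :=
          pvLmin_of_big cs hn hk0 hsm
        have hk0le : k0 ≤ (pvZl (cs ++ ['0']) (cs.length + 1)).getD (pvZC cs 0 k0) 0 := by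
          apply pvZl_le_of_count (cs ++ ['0']) (cs.length + 1) hjlen
          rw [pvZC_append cs hk0]
        have hiz : ((pvZC cs 0 k0 : Nat) : Int) ≤ (pvZC cs 0 cs.length : Int) := by
          push_cast; omega
        have hgj := hg ((pvZC cs 0 k0 : Nat) : Int) (by omega) hiz
        rw [Int.toNat_natCast] at hgj
        have hrle : (pvZl (cs ++ ['0']) (cs.length + 1)).getD (pvZC cs 0 k0) 0 ≤ cs.length := by
          have := (pvZl_get (cs ++ ['0']) (cs.length + 1) _ hjlen).2.2
          omega
        have hr' : pvZC cs 0 ((pvZl (cs ++ ['0']) (cs.length + 1)).getD (pvZC cs 0 k0) 0) =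
            pvZC cs 0 k0 := by
          rw [← pvZC_append cs hrle]
          exact (pvZl_get (cs ++ ['0']) (cs.length + 1) _ hjlen).1
        have hLb' : pvLmin cs n ((pvZl (cs ++ ['0']) (cs.length + 1)).getD (pvZC cs 0 k0) 0) =
            (pvZl (cs ++ ['0']) (cs.length + 1)).getD (pvZC cs 0 k0 - n.toNat - 1) 0 + 1 := by
          rw [pvLmin_of_big cs hn hrle (by rw [hr']; omega), hr']
        have hmem : ((pvZC cs 0 k0 : Nat) : Int) ∈
            PySem.List.pyRange (n + 1) ((pvZC cs 0 cs.length + 1 : Nat) : Int) 1 := by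
          apply PySem.List.mem_pyRange_one.mpr
          constructor
          · omega
          · push_cast; omega
        have hymem : g ((pvZC cs 0 k0 : Nat) : Int) ∈
            (PySem.List.pyRange (n + 1) ((pvZC cs 0 cs.length + 1 : Nat) : Int) 1).map g :=
          List.mem_map_of_mem hmem
        have hfin := (PySem.List.le_foldl_max
          ((PySem.List.pyRange (n + 1) ((pvZC cs 0 cs.length + 1 : Nat) : Int) 1).map g) (g n)).2
          _ hymem
        rw [hgj, hLb'] at hfin
        rw [hLb]
        push_cast at hfin ⊢
        omega

theorem A_eq_pvF (road : String) {n : Int} (hn : 0 ≤ n) :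
    solution road n = pvF road.toList n road.toList.length := by
  have hqn : (n.toNat : Int) = n := Int.toNat_of_nonneg hn
  simp only [solution]
  rw [A_list_eq (road.toList ++ ['0'])]
  have hlen1 : (road.toList ++ ['0']).length = road.toList.length + 1 := by simp
  rw [hlen1]
  generalize road.toList = cs
  rw [List.length_map, pvZlExt_length cs]
  by_cases hcase : ((pvZC cs 0 cs.length + 1 : Nat) : Int) ≤ n
  · rw [if_pos hcase]
    have hz_le : (pvZC cs 0 cs.length : Int) ≤ n := by push_cast at hcase; omega
    have hL : pvLmin cs n cs.length = 0 := pvLmin_of_small cs hn hz_le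
    have h1 : (cs.length : Int) ≤ pvF cs n cs.length := by
      have h := pvF_ge cs n (le_refl cs.length)
      rw [hL] at h
      push_cast at h; omega
    have h2 : pvF cs n cs.length ≤ (cs.length : Int) := by
      rcases pvF_cases cs n cs.length with h0 | ⟨k, hk, heq⟩
      · rw [h0]; omega
      · rw [heq]
        have := pvLmin_le cs n k
        omega
    push_cast
    omega
  · rw [if_neg hcase]
    have hq : n.toNat ≤ pvZC cs 0 cs.length := by push_cast at hcase; omega
    have hnb : n < ((pvZC cs 0 cs.length + 1 : Nat) : Int) := by push_cast; omega
    rw [foldl_two_append n _ _ _ [], List.nil_append,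
      PySem.List.pyRange_one_cons hnb, List.map_cons, PySem.List.max?_id_cons, Option.getD_some]
    exact gap_max_eq cs hn _ (fun i hi1 hi2 => A_entry_eq cs hn i hi1 hi2) hq

-- ===== VERDICT (by name: the statement is the Claim_ definition above) =====
theorem solution_spec : Claim_equal_solution := by
  intro road n _ hpre
  unfold Spec_solution
  rw [A_eq_pvF road hpre, alt_eq_pvF road hpre]
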